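-- pv_equiv track=rewrite | github.com/pavanchitikela/pet-dietary-system | testing/logic testing-1.py | suggest_diet_plan_with_feeding
-- ===== SOURCE A (Python) =====
-- def adjust_feeding_plan(weight, ideal_weight, is_overweight):
--     calorie_adjustment_step = 50
--     exercise_minutes_adjustment = 10
--
--     plan = {
--         "calorie_adjustment": -calorie_adjustment_step if is_overweight else calorie_adjustment_step,
--         "exercise_minutes": 30 + (exercise_minutes_adjustment if is_overweight else -exercise_minutes_adjustment),
--     }
--
--     adjustment_direction = "reduce" if is_overweight else "increase"
--     text_plan = f"To {adjustment_direction} your dog's weight to an ideal range of {ideal_weight[0]}-{ideal_weight[1]} lbs, " \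
--                 f"adjust its daily calorie intake by {plan['calorie_adjustment']} calories and aim for {plan['exercise_minutes']} minutes of exercise daily. " \
--                 "Monitor weight monthly and adjust as necessary."
--
--     return text_plan
--
-- def suggest_diet_plan_with_feeding(weight, age):
--     # Ideal weight ranges for Labrador Retrievers based on age (in months)
--     ideal_weight = {
--         (0, 2): (5, 10),
--         (2, 4): (10, 20),
--         (4, 6): (20, 30),
--         (6, 12): (30, 40),
--         (12, 24): (40, 60),
--         (24, 36): (50, 70),
--         (36, 48): (60, 80),
--         (48, 60): (70, 90),
--         (60, 72): (80, 100),
--     }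
--
--     # Convert age to months if given in years
--     if age > 12:
--         age *= 12
--
--     min_ideal_weight, max_ideal_weight = (0, 0)
--     for age_range, weight_range in ideal_weight.items():
--         if age_range[0] <= age <= age_range[1]:
--             min_ideal_weight, max_ideal_weight = weight_range
--             break
--
--     if min_ideal_weight == 0:
--         return "Age out of range. Please enter an age between 0 and 6 years."
--
--     if weight > max_ideal_weight:
--         return "Your dog is overweight. " + adjust_feeding_plan(weight, (min_ideal_weight, max_ideal_weight), True)
--     elif weight < min_ideal_weight:
--         return "Your dog is underweight. " + adjust_feeding_plan(weight, (min_ideal_weight, max_ideal_weight), False)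
--     else:
--         return "Your dog's weight is within the ideal range for its age."
-- ===== SOURCE B (Python) =====
-- _THRESHOLDS = [2, 4, 6, 12, 24, 36, 48, 60, 72]
-- _RANGES = [(5, 10), (10, 20), (20, 30), (30, 40), (40, 60),
--            (50, 70), (60, 80), (70, 90), (80, 100)]
--
-- _TAIL = ("adjust its daily calorie intake by {} calories and aim for {} minutes "
--          "of exercise daily. Monitor weight monthly and adjust as necessary.")
--
-- def suggest_diet_plan_with_feeding(weight, age):
--     months = age * 12 if age > 12 else age
--     if months < 0 or months > 72:
--         return "Age out of range. Please enter an age between 0 and 6 years."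
--     lo, hi = _RANGES[sum(t < months for t in _THRESHOLDS)]
--     if weight > hi:
--         return (f"Your dog is overweight. To reduce your dog's weight to an ideal "
--                 f"range of {lo}-{hi} lbs, " + _TAIL.format(-50, 40))
--     if weight < lo:
--         return (f"Your dog is underweight. To increase your dog's weight to an ideal "
--                 f"range of {lo}-{hi} lbs, " + _TAIL.format(50, 20))
--     return "Your dog's weight is within the ideal range for its age."
-- ===== Notes on version B (the rewrite author's own statement) =====
-- stated objective: simpler
-- what changed: Replaced the dict of age ranges plus a first-match linear scan with break and the helper's plan-dict string builder by a range guard, a count-of-thresholds table index into a sorted list of weight ranges, and direct f-string construction.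
import Mathlib
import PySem

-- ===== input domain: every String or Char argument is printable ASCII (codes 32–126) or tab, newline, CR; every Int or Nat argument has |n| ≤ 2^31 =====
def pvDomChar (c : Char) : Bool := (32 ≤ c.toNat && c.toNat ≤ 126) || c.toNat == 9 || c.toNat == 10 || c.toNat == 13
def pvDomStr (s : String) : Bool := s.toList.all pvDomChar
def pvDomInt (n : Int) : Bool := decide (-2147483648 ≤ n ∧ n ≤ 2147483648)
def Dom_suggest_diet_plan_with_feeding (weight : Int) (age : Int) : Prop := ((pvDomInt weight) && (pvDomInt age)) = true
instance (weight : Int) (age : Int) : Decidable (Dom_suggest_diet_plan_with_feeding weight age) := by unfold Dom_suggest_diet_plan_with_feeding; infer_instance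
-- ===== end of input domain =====

-- B replaces A's dict-and-linear-scan-with-break by a range guard plus a count-based table
-- index, and builds the plan strings directly without the helper's dict: simpler, same O(1) cost.


-- ===== PORT A =====
def adjust_feeding_plan (weight : Int) (ideal_weight : Int × Int) (is_overweight : Bool) : String :=
  let calorie_adjustment_step : Int := 50
  let exercise_minutes_adjustment : Int := 10
  let plan : PySem.Dict String Int :=
    ((PySem.Dict.empty).insert "calorie_adjustment"
        (if is_overweight then -calorie_adjustment_step else calorie_adjustment_step)).insert
      "exercise_minutes"
        (30 + (if is_overweight then exercise_minutes_adjustment else -exercise_minutes_adjustment))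
  let adjustment_direction := if is_overweight then "reduce" else "increase"
  "To " ++ adjustment_direction ++ " your dog's weight to an ideal range of " ++
    PySem.Int.toStr ideal_weight.1 ++ "-" ++ PySem.Int.toStr ideal_weight.2 ++
    " lbs, adjust its daily calorie intake by " ++
    PySem.Int.toStr (plan.getD "calorie_adjustment" 0) ++ " calories and aim for " ++
    PySem.Int.toStr (plan.getD "exercise_minutes" 0) ++
    " minutes of exercise daily. Monitor weight monthly and adjust as necessary."

def pvIdealWeightItems : List ((Int × Int) × (Int × Int)) :=
  [((0, 2), (5, 10)), ((2, 4), (10, 20)), ((4, 6), (20, 30)), ((6, 12), (30, 40)),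
   ((12, 24), (40, 60)), ((24, 36), (50, 70)), ((36, 48), (60, 80)),
   ((48, 60), (70, 90)), ((60, 72), (80, 100))]

-- A's for-loop with break: first matching range, else the initial (0, 0)
def pvFindRange (age : Int) : List ((Int × Int) × (Int × Int)) → Int × Int
  | [] => (0, 0)
  | (age_range, weight_range) :: rest =>
      if age_range.1 ≤ age ∧ age ≤ age_range.2 then weight_range else pvFindRange age rest

def suggest_diet_plan_with_feeding (weight : Int) (age : Int) : String :=
  let age1 := if age > 12 then age * 12 else age
  let r := pvFindRange age1 pvIdealWeightItems
  let min_ideal_weight := r.1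
  let max_ideal_weight := r.2
  if min_ideal_weight = 0 then
    "Age out of range. Please enter an age between 0 and 6 years."
  else if weight > max_ideal_weight then
    "Your dog is overweight. " ++ adjust_feeding_plan weight (min_ideal_weight, max_ideal_weight) true
  else if weight < min_ideal_weight then
    "Your dog is underweight. " ++ adjust_feeding_plan weight (min_ideal_weight, max_ideal_weight) false
  else
    "Your dog's weight is within the ideal range for its age."

-- ===== PORT B =====
def pvThresholds : List Int := [2, 4, 6, 12, 24, 36, 48, 60, 72]

def pvRanges : List (Int × Int) :=
  [(5, 10), (10, 20), (20, 30), (30, 40), (40, 60), (50, 70), (60, 80), (70, 90), (80, 100)]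

-- sum(t < months for t in _THRESHOLDS)
def pvCountLt (months : Int) : List Int → Nat
  | [] => 0
  | t :: rest => (if t < months then 1 else 0) + pvCountLt months rest

-- _TAIL.format(cal, mins)
def pvTail (cal : Int) (mins : Int) : String :=
  "adjust its daily calorie intake by " ++ PySem.Int.toStr cal ++
    " calories and aim for " ++ PySem.Int.toStr mins ++
    " minutes of exercise daily. Monitor weight monthly and adjust as necessary."

def suggest_diet_plan_with_feeding_alt (weight : Int) (age : Int) : String :=
  let months := if age > 12 then age * 12 else age
  if months < 0 ∨ 72 < months then
    "Age out of range. Please enter an age between 0 and 6 years."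
  else
    let r := pvRanges.getD (pvCountLt months pvThresholds) (0, 0)
    if weight > r.2 then
      "Your dog is overweight. To reduce your dog's weight to an ideal range of " ++
        PySem.Int.toStr r.1 ++ "-" ++ PySem.Int.toStr r.2 ++ " lbs, " ++ pvTail (-50) 40
    else if weight < r.1 then
      "Your dog is underweight. To increase your dog's weight to an ideal range of " ++
        PySem.Int.toStr r.1 ++ "-" ++ PySem.Int.toStr r.2 ++ " lbs, " ++ pvTail 50 20
    else
      "Your dog's weight is within the ideal range for its age."

-- ===== PRECONDITION & SPEC =====
def Spec_suggest_diet_plan_with_feeding (weight : Int) (age : Int) (out : String) : Prop := out = suggest_diet_plan_with_feeding_alt weight age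
instance (weight : Int) (age : Int) (out : String) : Decidable (Spec_suggest_diet_plan_with_feeding weight age out) := by unfold Spec_suggest_diet_plan_with_feeding; infer_instance

-- ===== CLAIM (what is proved, stated in full; the proofs are below) =====
def Claim_equal_suggest_diet_plan_with_feeding : Prop := ∀ (weight : Int) (age : Int), Dom_suggest_diet_plan_with_feeding weight age → Spec_suggest_diet_plan_with_feeding weight age (suggest_diet_plan_with_feeding weight age)

-- ===== LEMMAS AND PROOFS =====

-- pull a symbolic tail out of a right-nested append so the closed head can reduce
lemma pv_pull (a b c d T : String) : a ++ (b ++ (c ++ (d ++ T))) = ((a ++ b) ++ (c ++ d)) ++ T := by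
  simp [String.append_assoc]

-- A's overweight / underweight message equals B's, for any concrete range
lemma pv_over_eq (weight mn mx : Int) :
    "Your dog is overweight. " ++ adjust_feeding_plan weight (mn, mx) true =
      "Your dog is overweight. To reduce your dog's weight to an ideal range of " ++
        PySem.Int.toStr mn ++ "-" ++ PySem.Int.toStr mx ++ " lbs, " ++ pvTail (-50) 40 := by
  simp only [adjust_feeding_plan, pvTail, String.append_assoc]
  rw [pv_pull]
  rfl

lemma pv_under_eq (weight mn mx : Int) :
    "Your dog is underweight. " ++ adjust_feeding_plan weight (mn, mx) false =
      "Your dog is underweight. To increase your dog's weight to an ideal range of " ++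
        PySem.Int.toStr mn ++ "-" ++ PySem.Int.toStr mx ++ " lbs, " ++ pvTail 50 20 := by
  simp only [adjust_feeding_plan, pvTail, String.append_assoc]
  rw [pv_pull]
  rfl

-- one in-range band: A's scan found (mn, mx) and B's counted index finds the same pair
lemma pv_region (weight m mn mx : Int) (k : Nat)
    (hF : pvFindRange m pvIdealWeightItems = (mn, mx))
    (hC : pvCountLt m pvThresholds = k)
    (hk : pvRanges.getD k (0, 0) = (mn, mx))
    (hmn : ¬ mn = 0) (hm : ¬ (m < 0 ∨ 72 < m)) :
    (let r := pvFindRange m pvIdealWeightItems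
     if r.1 = 0 then "Age out of range. Please enter an age between 0 and 6 years."
     else if weight > r.2 then "Your dog is overweight. " ++ adjust_feeding_plan weight (r.1, r.2) true
     else if weight < r.1 then "Your dog is underweight. " ++ adjust_feeding_plan weight (r.1, r.2) false
     else "Your dog's weight is within the ideal range for its age.") =
    (if m < 0 ∨ 72 < m then "Age out of range. Please enter an age between 0 and 6 years."
     else
       let r := pvRanges.getD (pvCountLt m pvThresholds) (0, 0)
       if weight > r.2 then
         "Your dog is overweight. To reduce your dog's weight to an ideal range of " ++
           PySem.Int.toStr r.1 ++ "-" ++ PySem.Int.toStr r.2 ++ " lbs, " ++ pvTail (-50) 40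
       else if weight < r.1 then
         "Your dog is underweight. To increase your dog's weight to an ideal range of " ++
           PySem.Int.toStr r.1 ++ "-" ++ PySem.Int.toStr r.2 ++ " lbs, " ++ pvTail 50 20
       else "Your dog's weight is within the ideal range for its age.") := by
  rw [hF, hC, hk, if_neg hm]
  dsimp only
  rw [if_neg hmn]
  split_ifs with h1 h2
  · exact pv_over_eq weight mn mx
  · exact pv_under_eq weight mn mx
  · rfl

-- out of range on both sides
lemma pv_out (weight m : Int) (hm : m < 0 ∨ 72 < m)
    (hF : pvFindRange m pvIdealWeightItems = (0, 0)) :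
    (let r := pvFindRange m pvIdealWeightItems
     if r.1 = 0 then "Age out of range. Please enter an age between 0 and 6 years."
     else if weight > r.2 then "Your dog is overweight. " ++ adjust_feeding_plan weight (r.1, r.2) true
     else if weight < r.1 then "Your dog is underweight. " ++ adjust_feeding_plan weight (r.1, r.2) false
     else "Your dog's weight is within the ideal range for its age.") =
    (if m < 0 ∨ 72 < m then "Age out of range. Please enter an age between 0 and 6 years."
     else
       let r := pvRanges.getD (pvCountLt m pvThresholds) (0, 0)
       if weight > r.2 then
         "Your dog is overweight. To reduce your dog's weight to an ideal range of " ++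
           PySem.Int.toStr r.1 ++ "-" ++ PySem.Int.toStr r.2 ++ " lbs, " ++ pvTail (-50) 40
       else if weight < r.1 then
         "Your dog is underweight. To increase your dog's weight to an ideal range of " ++
           PySem.Int.toStr r.1 ++ "-" ++ PySem.Int.toStr r.2 ++ " lbs, " ++ pvTail 50 20
       else "Your dog's weight is within the ideal range for its age.") := by
  rw [hF, if_pos hm]
  rfl

-- core equivalence after the years→months conversion
set_option maxHeartbeats 2000000 in
lemma pv_core (weight m : Int) :
    (let r := pvFindRange m pvIdealWeightItems
     if r.1 = 0 then "Age out of range. Please enter an age between 0 and 6 years."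
     else if weight > r.2 then "Your dog is overweight. " ++ adjust_feeding_plan weight (r.1, r.2) true
     else if weight < r.1 then "Your dog is underweight. " ++ adjust_feeding_plan weight (r.1, r.2) false
     else "Your dog's weight is within the ideal range for its age.") =
    (if m < 0 ∨ 72 < m then "Age out of range. Please enter an age between 0 and 6 years."
     else
       let r := pvRanges.getD (pvCountLt m pvThresholds) (0, 0)
       if weight > r.2 then
         "Your dog is overweight. To reduce your dog's weight to an ideal range of " ++
           PySem.Int.toStr r.1 ++ "-" ++ PySem.Int.toStr r.2 ++ " lbs, " ++ pvTail (-50) 40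
       else if weight < r.1 then
         "Your dog is underweight. To increase your dog's weight to an ideal range of " ++
           PySem.Int.toStr r.1 ++ "-" ++ PySem.Int.toStr r.2 ++ " lbs, " ++ pvTail 50 20
       else "Your dog's weight is within the ideal range for its age.") := by
  rcases lt_or_ge m 0 with h | h0
  · exact pv_out weight m (Or.inl h)
      (by simp only [pvFindRange, pvIdealWeightItems]; split_ifs <;> first | rfl | omega)
  rcases lt_or_ge (72 : Int) m with h72 | h72
  · exact pv_out weight m (Or.inr h72)
      (by simp only [pvFindRange, pvIdealWeightItems]; split_ifs <;> first | rfl | omega)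
  by_cases h2 : m ≤ 2
  · exact pv_region weight m 5 10 0
      (by simp only [pvFindRange, pvIdealWeightItems]; split_ifs <;> first | rfl | omega)
      (by simp only [pvCountLt, pvThresholds, if_neg (show ¬(2:Int) < m by omega), if_neg (show ¬(4:Int) < m by omega), if_neg (show ¬(6:Int) < m by omega), if_neg (show ¬(12:Int) < m by omega), if_neg (show ¬(24:Int) < m by omega), if_neg (show ¬(36:Int) < m by omega), if_neg (show ¬(48:Int) < m by omega), if_neg (show ¬(60:Int) < m by omega), if_neg (show ¬(72:Int) < m by omega)]) rfl (by norm_num) (by omega)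
  by_cases h4 : m ≤ 4
  · exact pv_region weight m 10 20 1
      (by simp only [pvFindRange, pvIdealWeightItems]; split_ifs <;> first | rfl | omega)
      (by simp only [pvCountLt, pvThresholds, if_pos (show (2:Int) < m by omega), if_neg (show ¬(4:Int) < m by omega), if_neg (show ¬(6:Int) < m by omega), if_neg (show ¬(12:Int) < m by omega), if_neg (show ¬(24:Int) < m by omega), if_neg (show ¬(36:Int) < m by omega), if_neg (show ¬(48:Int) < m by omega), if_neg (show ¬(60:Int) < m by omega), if_neg (show ¬(72:Int) < m by omega)]) rfl (by norm_num) (by omega)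
  by_cases h6 : m ≤ 6
  · exact pv_region weight m 20 30 2
      (by simp only [pvFindRange, pvIdealWeightItems]; split_ifs <;> first | rfl | omega)
      (by simp only [pvCountLt, pvThresholds, if_pos (show (2:Int) < m by omega), if_pos (show (4:Int) < m by omega), if_neg (show ¬(6:Int) < m by omega), if_neg (show ¬(12:Int) < m by omega), if_neg (show ¬(24:Int) < m by omega), if_neg (show ¬(36:Int) < m by omega), if_neg (show ¬(48:Int) < m by omega), if_neg (show ¬(60:Int) < m by omega), if_neg (show ¬(72:Int) < m by omega)]) rfl (by norm_num) (by omega)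
  by_cases h12 : m ≤ 12
  · exact pv_region weight m 30 40 3
      (by simp only [pvFindRange, pvIdealWeightItems]; split_ifs <;> first | rfl | omega)
      (by simp only [pvCountLt, pvThresholds, if_pos (show (2:Int) < m by omega), if_pos (show (4:Int) < m by omega), if_pos (show (6:Int) < m by omega), if_neg (show ¬(12:Int) < m by omega), if_neg (show ¬(24:Int) < m by omega), if_neg (show ¬(36:Int) < m by omega), if_neg (show ¬(48:Int) < m by omega), if_neg (show ¬(60:Int) < m by omega), if_neg (show ¬(72:Int) < m by omega)]) rfl (by norm_num) (by omega)
  by_cases h24 : m ≤ 24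
  · exact pv_region weight m 40 60 4
      (by simp only [pvFindRange, pvIdealWeightItems]; split_ifs <;> first | rfl | omega)
      (by simp only [pvCountLt, pvThresholds, if_pos (show (2:Int) < m by omega), if_pos (show (4:Int) < m by omega), if_pos (show (6:Int) < m by omega), if_pos (show (12:Int) < m by omega), if_neg (show ¬(24:Int) < m by omega), if_neg (show ¬(36:Int) < m by omega), if_neg (show ¬(48:Int) < m by omega), if_neg (show ¬(60:Int) < m by omega), if_neg (show ¬(72:Int) < m by omega)]) rfl (by norm_num) (by omega)
  by_cases h36 : m ≤ 36
  · exact pv_region weight m 50 70 5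
      (by simp only [pvFindRange, pvIdealWeightItems]; split_ifs <;> first | rfl | omega)
      (by simp only [pvCountLt, pvThresholds, if_pos (show (2:Int) < m by omega), if_pos (show (4:Int) < m by omega), if_pos (show (6:Int) < m by omega), if_pos (show (12:Int) < m by omega), if_pos (show (24:Int) < m by omega), if_neg (show ¬(36:Int) < m by omega), if_neg (show ¬(48:Int) < m by omega), if_neg (show ¬(60:Int) < m by omega), if_neg (show ¬(72:Int) < m by omega)]) rfl (by norm_num) (by omega)
  by_cases h48 : m ≤ 48
  · exact pv_region weight m 60 80 6
      (by simp only [pvFindRange, pvIdealWeightItems]; split_ifs <;> first | rfl | omega)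
      (by simp only [pvCountLt, pvThresholds, if_pos (show (2:Int) < m by omega), if_pos (show (4:Int) < m by omega), if_pos (show (6:Int) < m by omega), if_pos (show (12:Int) < m by omega), if_pos (show (24:Int) < m by omega), if_pos (show (36:Int) < m by omega), if_neg (show ¬(48:Int) < m by omega), if_neg (show ¬(60:Int) < m by omega), if_neg (show ¬(72:Int) < m by omega)]) rfl (by norm_num) (by omega)
  by_cases h60 : m ≤ 60
  · exact pv_region weight m 70 90 7
      (by simp only [pvFindRange, pvIdealWeightItems]; split_ifs <;> first | rfl | omega)
      (by simp only [pvCountLt, pvThresholds, if_pos (show (2:Int) < m by omega), if_pos (show (4:Int) < m by omega), if_pos (show (6:Int) < m by omega), if_pos (show (12:Int) < m by omega), if_pos (show (24:Int) < m by omega), if_pos (show (36:Int) < m by omega), if_pos (show (48:Int) < m by omega), if_neg (show ¬(60:Int) < m by omega), if_neg (show ¬(72:Int) < m by omega)]) rfl (by norm_num) (by omega)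
  · exact pv_region weight m 80 100 8
      (by simp only [pvFindRange, pvIdealWeightItems]; split_ifs <;> first | rfl | omega)
      (by simp only [pvCountLt, pvThresholds, if_pos (show (2:Int) < m by omega), if_pos (show (4:Int) < m by omega), if_pos (show (6:Int) < m by omega), if_pos (show (12:Int) < m by omega), if_pos (show (24:Int) < m by omega), if_pos (show (36:Int) < m by omega), if_pos (show (48:Int) < m by omega), if_pos (show (60:Int) < m by omega), if_neg (show ¬(72:Int) < m by omega)]) rfl (by norm_num) (by omega)

-- ===== VERDICT (by name: the statement is the Claim_ definition above) =====
theorem suggest_diet_plan_with_feeding_spec : Claim_equal_suggest_diet_plan_with_feeding := by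
  intro weight age _
  unfold Spec_suggest_diet_plan_with_feeding suggest_diet_plan_with_feeding suggest_diet_plan_with_feeding_alt
  exact pv_core weight (if age > 12 then age * 12 else age)
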